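-- pv_equiv track=rewrite | github.com/david12345abc/DashboardBack | getkpi/calc_budget_techdir_m3.py | _collect_subtree
-- ===== SOURCE A (Python) =====
-- def _collect_subtree(root_key: str, by_parent) -> set[str]:
--     keys: set[str] = set()
--     stack = [root_key]
--     while stack:
--         current = stack.pop()
--         if current in keys:
--             continue
--         keys.add(current)
--         for child in by_parent.get(current, []):
--             ck = child.get("Ref_Key")
--             if ck:
--                 stack.append(ck)
--     return keys
-- ===== SOURCE B (Python) =====
-- def _collect_subtree(root_key: str, by_parent) -> set[str]:
--     # Recursive decomposition instead of A's explicit-stack while loop: a shared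
--     # visited set, and a visit(key) helper that short-circuits on already-visited
--     # keys and recurses into each child's truthy "Ref_Key". The result is a set,
--     # so the iteration order over children is irrelevant; reversed() is used so
--     # the traversal also mirrors A's pop-from-the-end order node for node.
--     # (Unlike A, an extremely deep chain of distinct keys could hit Python's
--     # recursion limit; depth is bounded by the number of distinct keys visited.)
--     keys: set[str] = set()
--
--     def visit(key):
--         if key in keys:
--             return
--         keys.add(key)
--         for child in reversed(by_parent.get(key, [])):
--             ck = child.get("Ref_Key")
--             if ck:
--                 visit(ck)
--
--     visit(root_key)
--     return keys
-- ===== Notes on version B (the rewrite author's own statement) =====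
-- stated objective: alternative
-- what changed: Replaces the iterative while-loop over an explicit mutable stack with a recursive visit(key) helper that short-circuits on visited keys and recurses directly over each node's children, so no worklist is materialised.
import Mathlib
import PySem

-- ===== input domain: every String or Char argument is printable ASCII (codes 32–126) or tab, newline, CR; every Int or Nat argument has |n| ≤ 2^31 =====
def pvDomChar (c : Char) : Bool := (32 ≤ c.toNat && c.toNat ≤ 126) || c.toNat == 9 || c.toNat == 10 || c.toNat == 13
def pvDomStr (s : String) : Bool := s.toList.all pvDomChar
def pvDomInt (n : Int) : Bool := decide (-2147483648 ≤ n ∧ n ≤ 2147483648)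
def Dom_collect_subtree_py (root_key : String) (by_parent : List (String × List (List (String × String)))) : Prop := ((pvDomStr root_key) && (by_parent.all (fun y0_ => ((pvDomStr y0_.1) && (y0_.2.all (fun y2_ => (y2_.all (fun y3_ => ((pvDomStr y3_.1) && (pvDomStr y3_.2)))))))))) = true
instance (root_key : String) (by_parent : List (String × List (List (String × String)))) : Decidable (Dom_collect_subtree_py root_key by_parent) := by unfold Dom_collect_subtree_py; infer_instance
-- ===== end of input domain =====

-- B replaces A's while-loop over an explicit mutable stack with a recursive visit(key)
-- helper over the children (objective: alternative decomposition, not faster; the Python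
-- return value is a set, so the traversal order cannot affect the result — B's reversed()
-- child order also matches A's pop-from-the-end order node for node, which is what the
-- list-level Lean equality below states). B's Python recursion could hit the interpreter's
-- recursion limit on chains of more than ~1000 DISTINCT keys, where A still returns.
-- Both ports return the PySem.Set insertion-order list.

-- ===== shared helpers (each is a line of BOTH Pythons: `child.get("Ref_Key")` with the
-- truthiness test, and `by_parent.get(k, [])`) =====

-- `child.get("Ref_Key")`, kept only when truthy (a nonempty string)
def refOf (child : List (String × String)) : Option String :=
  match PySem.Dict.get? (PySem.Dict.ofList child) "Ref_Key" with
  | some s => if s = "" then none else some s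
  | none => none

-- `by_parent.get(k, [])`
def rawKids (by_parent : List (String × List (List (String × String)))) (k : String) :
    List (List (String × String)) :=
  PySem.Dict.getD (PySem.Dict.ofList by_parent) k []

-- every key either algorithm can ever see (root plus every truthy "Ref_Key" value);
-- used only as a termination measure / fuel bound, never to steer the computation
def candOf (root_key : String) (by_parent : List (String × List (List (String × String)))) :
    List String :=
  root_key :: by_parent.flatMap (fun p => p.2.filterMap refOf)

-- number of candidate keys not yet visited (the termination measure of A's port)
def uv (root_key : String) (by_parent : List (String × List (List (String × String))))
    (keys : List String) : Nat :=
  ((candOf root_key by_parent).filter (fun c => !keys.contains c)).length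

-- the values a Dict built from a pair list can hold all come from that list
lemma values_foldl_insert_sub {κ ν : Type} [BEq κ] [LawfulBEq κ] (l : List (κ × ν))
    (d : PySem.Dict κ ν) (w : ν)
    (hw : w ∈ (l.foldl (fun d p => d.insert p.1 p.2) d).values) :
    w ∈ d.values ∨ ∃ p ∈ l, w = p.2 := by
  induction l generalizing d with
  | nil => exact Or.inl hw
  | cons q l ih =>
    rcases ih _ hw with h | ⟨p, hp, hv⟩
    · rcases PySem.Dict.mem_values_insert _ _ _ _ h with h | h
      · exact Or.inr ⟨q, List.mem_cons_self, h⟩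
      · exact Or.inl h
    · exact Or.inr ⟨p, List.mem_cons_of_mem _ hp, hv⟩

-- every truthy child reference is a candidate (needed by the termination arguments)
lemma kid_mem_cand (root_key : String) (by_parent : List (String × List (List (String × String))))
    (k x : String) (hx : x ∈ (rawKids by_parent k).filterMap refOf) :
    x ∈ candOf root_key by_parent := by
  rcases List.mem_filterMap.mp hx with ⟨c, hc, hcx⟩
  have hv : rawKids by_parent k ∈ (PySem.Dict.ofList by_parent).values ∨
      rawKids by_parent k = [] := by
    unfold rawKids
    rw [PySem.Dict.getD_eq_get?_getD]
    cases hg : PySem.Dict.get? (PySem.Dict.ofList by_parent) k with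
    | none => exact Or.inr rfl
    | some v =>
      left
      have := PySem.Dict.mem_items_of_get?_eq_some _ hg
      simp [PySem.Dict.values]
      exact ⟨k, this⟩
  rcases hv with hv | hv
  · have : rawKids by_parent k ∈
        (by_parent.foldl (fun d p => d.insert p.1 p.2) PySem.Dict.empty).values := hv
    rcases values_foldl_insert_sub by_parent _ _ this with h | ⟨p, hp, hval⟩
    · simp [PySem.Dict.values, PySem.Dict.empty] at h
    · refine List.mem_cons_of_mem _ (List.mem_flatMap.mpr ⟨p, hp, ?_⟩)
      rw [← hval]
      exact List.mem_filterMap.mpr ⟨c, hc, hcx⟩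
  · rw [hv] at hc; cases hc

lemma filter_len_le {α : Type} (l : List α) (p q : α → Bool)
    (hpq : ∀ c, q c = true → p c = true) :
    (l.filter q).length ≤ (l.filter p).length := by
  rw [← List.countP_eq_length_filter, ← List.countP_eq_length_filter]
  exact List.countP_mono_left (fun a _ hq => hpq a hq)

lemma filter_len_lt {α : Type} (l : List α) (p q : α → Bool)
    (hpq : ∀ c, q c = true → p c = true) (x : α) (hx : x ∈ l)
    (hpx : p x = true) (hqx : q x = false) :
    (l.filter q).length < (l.filter p).length := by
  rcases List.append_of_mem hx with ⟨l1, l2, rfl⟩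
  have h1 := filter_len_le l1 p q hpq
  have h2 := filter_len_le l2 p q hpq
  simp [List.filter_append, hpx, hqx]
  omega

-- marking a fresh candidate strictly shrinks the measure
lemma uv_add_lt (root_key : String) (by_parent : List (String × List (List (String × String))))
    (keys : List String) (x : String) (hx : x ∈ candOf root_key by_parent)
    (hmem : keys.contains x = false) :
    uv root_key by_parent (PySem.Set.add keys x) < uv root_key by_parent keys := by
  have hadd : PySem.Set.add keys x = keys ++ [x] := by
    simp only [PySem.Set.add, PySem.Set.contains, hmem]
    simp
  unfold uv
  rw [hadd]
  refine filter_len_lt _ _ _ ?_ x hx ?_ ?_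
  · intro c hc
    simp at hc ⊢
    exact hc.1
  · simpa using hmem
  · simp

-- ===== PORT A =====
-- the truthy child keys of `k`, reversed (A pushes them in order on a stack popped from
-- the end), with their candidate-membership proofs attached for termination
def pushKids (root_key : String) (by_parent : List (String × List (List (String × String))))
    (k : String) : List {x : String // x ∈ candOf root_key by_parent} :=
  (((rawKids by_parent k).filterMap refOf).reverse).attach.map
    (fun c => ⟨c.val, kid_mem_cand root_key by_parent k c.val (List.mem_reverse.mp c.property)⟩)

-- A's `while stack:` loop: pop, skip if visited, else mark and push the truthy children.
def loopA (root_key : String) (by_parent : List (String × List (List (String × String))))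
    (keys : List String) (stack : List {x : String // x ∈ candOf root_key by_parent}) :
    List String :=
  match stack with
  | [] => keys
  | current :: rest =>
    if h : PySem.Set.contains keys current.val then
      loopA root_key by_parent keys rest
    else
      loopA root_key by_parent (PySem.Set.add keys current.val)
        (pushKids root_key by_parent current.val ++ rest)
termination_by (uv root_key by_parent keys, stack.length)
decreasing_by
  · apply Prod.Lex.right; simp
  · apply Prod.Lex.left
    exact uv_add_lt root_key by_parent keys current.val current.property
      (Bool.eq_false_iff.mpr h)

def collect_subtree_py (root_key : String)
    (by_parent : List (String × List (List (String × String)))) : List String :=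
  loopA root_key by_parent [] [⟨root_key, by simp [candOf]⟩]

-- ===== PORT B =====
-- B's recursive `visit(key)`: return if visited, else mark `key` and recurse into the
-- truthy "Ref_Key" of each child, children taken in reversed() order. The Nat argument is
-- a fuel guard that only makes the recursion total; the top-level call below passes enough
-- fuel ((candOf …).length bounds the fresh visits) so the zero branch is never the answer.
def visitB (by_parent : List (String × List (List (String × String))))
    (fuel : Nat) (key : String) (keys : List String) : List String :=
  match fuel with
  | 0 => keys
  | f + 1 =>
    if PySem.Set.contains keys key then keys
    else
      ((rawKids by_parent key).reverse).foldl
        (fun ks child =>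
          match refOf child with
          | some ck => visitB by_parent f ck ks
          | none => ks)
        (PySem.Set.add keys key)
termination_by fuel

def collect_subtree_py_alt (root_key : String)
    (by_parent : List (String × List (List (String × String)))) : List String :=
  visitB by_parent (candOf root_key by_parent).length root_key []

-- ===== PRECONDITION & SPEC =====
def Spec_collect_subtree_py (root_key : String) (by_parent : List (String × List (List (String × String)))) (out : List String) : Prop := out = collect_subtree_py_alt root_key by_parent
instance (root_key : String) (by_parent : List (String × List (List (String × String)))) (out : List String) : Decidable (Spec_collect_subtree_py root_key by_parent out) := by unfold Spec_collect_subtree_py; infer_instance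

-- ===== CLAIM (what is proved, stated in full; the proofs are below) =====
def Claim_equal_collect_subtree_py : Prop := ∀ (root_key : String) (by_parent : List (String × List (List (String × String)))), Dom_collect_subtree_py root_key by_parent → Spec_collect_subtree_py root_key by_parent (collect_subtree_py root_key by_parent)

-- ===== LEMMAS AND PROOFS =====

-- visiting a list of keys left to right (proof-side abbreviation)
def visitList (by_parent : List (String × List (List (String × String))))
    (fuel : Nat) (xs : List String) (keys : List String) : List String :=
  xs.foldl (fun ks x => visitB by_parent fuel x ks) keys

lemma visitB_stop (by_parent : List (String × List (List (String × String))))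
    (fuel : Nat) (key : String) (keys : List String)
    (h : PySem.Set.contains keys key = true) :
    visitB by_parent fuel key keys = keys := by
  cases fuel with
  | zero => simp [visitB]
  | succ f => simp only [visitB]; rw [if_pos h]

-- the inner child fold of visitB is visitList over the truthy child keys
lemma fold_step_eq (by_parent : List (String × List (List (String × String)))) (f : Nat)
    (cs : List (List (String × String))) (ks : List String) :
    cs.foldl
        (fun ks child =>
          match refOf child with
          | some ck => visitB by_parent f ck ks
          | none => ks) ks
      = visitList by_parent f (cs.filterMap refOf) ks := by
  induction cs generalizing ks with
  | nil => simp [visitList]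
  | cons c cs ih =>
    cases h : refOf c with
    | none => simp only [List.foldl_cons, List.filterMap_cons, h]; exact ih ks
    | some ck => simp only [List.foldl_cons, List.filterMap_cons, h]; exact ih _

-- visitB only ever appends to the visited set
lemma visitB_ext (by_parent : List (String × List (List (String × String)))) :
    ∀ (fuel : Nat) (key : String) (keys : List String),
      ∃ e, visitB by_parent fuel key keys = keys ++ e := by
  intro fuel
  induction fuel with
  | zero => intro key keys; exact ⟨[], by simp [visitB]⟩
  | succ f ih =>
    intro key keys
    by_cases h : PySem.Set.contains keys key
    · exact ⟨[], by simp only [visitB]; rw [if_pos h]; simp⟩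
    · have hlist : ∀ (xs : List String) (ks : List String),
          ∃ e, visitList by_parent f xs ks = ks ++ e := by
        intro xs
        induction xs with
        | nil => intro ks; exact ⟨[], by simp [visitList]⟩
        | cons x xs ihx =>
          intro ks
          rcases ih x ks with ⟨e1, he1⟩
          rcases ihx (visitB by_parent f x ks) with ⟨e2, he2⟩
          exact ⟨e1 ++ e2, by simp [visitList, List.foldl] at he2 ⊢; rw [he2, he1, List.append_assoc]⟩
      rcases hlist (((rawKids by_parent key).reverse).filterMap refOf)
          (PySem.Set.add keys key) with ⟨e, he⟩
      refine ⟨key :: e, ?_⟩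
      have hadd : PySem.Set.add keys key = keys ++ [key] := by
        simp only [PySem.Set.add]
        rw [if_neg h]
      simp only [visitB]
      rw [if_neg h, fold_step_eq, he, hadd, List.append_assoc]
      simp

lemma visitList_ext (by_parent : List (String × List (List (String × String))))
    (fuel : Nat) (xs : List String) (keys : List String) :
    ∃ e, visitList by_parent fuel xs keys = keys ++ e := by
  induction xs generalizing keys with
  | nil => exact ⟨[], by simp [visitList]⟩
  | cons x xs ih =>
    rcases visitB_ext by_parent fuel x keys with ⟨e1, he1⟩
    rcases ih (visitB by_parent fuel x keys) with ⟨e2, he2⟩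
    exact ⟨e1 ++ e2, by simp [visitList, List.foldl] at he2 ⊢; rw [he2, he1, List.append_assoc]⟩

-- extending the visited set never increases the unvisited count
lemma uv_append_le (root_key : String) (by_parent : List (String × List (List (String × String))))
    (keys e : List String) :
    uv root_key by_parent (keys ++ e) ≤ uv root_key by_parent keys := by
  unfold uv
  refine filter_len_le _ _ _ ?_
  intro c hc
  simp at hc ⊢
  exact hc.1

-- visitB with a fresh key: one marked key, then visitList over the truthy kids
lemma visitB_fresh (by_parent : List (String × List (List (String × String))))
    (f : Nat) (key : String) (keys : List String)
    (h : ¬ PySem.Set.contains keys key = true) :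
    visitB by_parent (f + 1) key keys
      = visitList by_parent f (((rawKids by_parent key).filterMap refOf).reverse)
          (PySem.Set.add keys key) := by
  simp only [visitB]
  rw [if_neg h, fold_step_eq, List.filterMap_reverse]

-- the key correspondence: A's stack loop on `a ++ s` equals B's visitList on a's keys,
-- then the loop on `s` — by strong induction on the unvisited count
lemma loopA_visitList (root_key : String)
    (by_parent : List (String × List (List (String × String)))) :
    ∀ (n : Nat) (keys : List String), uv root_key by_parent keys = n →
    ∀ (fuel : Nat), n ≤ fuel →
    ∀ (a : List {x : String // x ∈ candOf root_key by_parent})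
      (s : List {x : String // x ∈ candOf root_key by_parent}),
      loopA root_key by_parent keys (a ++ s)
        = loopA root_key by_parent
            (visitList by_parent fuel (a.map Subtype.val) keys) s := by
  intro n
  induction n using Nat.strong_induction_on with
  | _ n IHn =>
    intro keys hk fuel hf a
    induction a with
    | nil => intro s; simp [visitList]
    | cons key a' IHa =>
      intro s
      rw [List.cons_append]
      by_cases h : PySem.Set.contains keys key.val
      · rw [loopA, dif_pos h]
        have : visitList by_parent fuel ((key :: a').map Subtype.val) keys
            = visitList by_parent fuel (a'.map Subtype.val) keys := by
          simp [visitList, List.foldl, visitB_stop by_parent fuel key.val keys h]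
        rw [this]
        exact IHa s
      · -- fresh key: n ≥ 1, so fuel = f + 1
        have hlt1 : uv root_key by_parent (PySem.Set.add keys key.val) < n := by
          rw [← hk]
          exact uv_add_lt root_key by_parent keys key.val key.property
            (Bool.eq_false_iff.mpr h)
        cases fuel with
        | zero => omega
        | succ f =>
          rw [loopA, dif_neg h]
          -- first IH: consume the pushed kids
          have h1 := IHn _ hlt1 (PySem.Set.add keys key.val) rfl f (by omega)
            (pushKids root_key by_parent key.val) (a' ++ s)
          rw [h1]
          have hmap : (pushKids root_key by_parent key.val).map Subtype.val
              = ((rawKids by_parent key.val).filterMap refOf).reverse := by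
            simp [pushKids]
          rw [hmap]
          set keys₂ := visitList by_parent f
            (((rawKids by_parent key.val).filterMap refOf).reverse)
            (PySem.Set.add keys key.val) with hkeys₂
          -- second IH: consume the rest of the worklist
          have hlt2 : uv root_key by_parent keys₂ < n := by
            rcases visitList_ext by_parent f
              (((rawKids by_parent key.val).filterMap refOf).reverse)
              (PySem.Set.add keys key.val) with ⟨e, he⟩
            rw [hkeys₂, he]
            exact lt_of_le_of_lt (uv_append_le root_key by_parent _ e) hlt1
          have h2 := IHn _ hlt2 keys₂ rfl (f + 1) (by omega) a' s
          rw [h2]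
          -- identify the visited sets on the right
          have : visitList by_parent (f + 1) ((key :: a').map Subtype.val) keys
              = visitList by_parent (f + 1) (a'.map Subtype.val) keys₂ := by
            simp only [List.map_cons, visitList, List.foldl]
            rw [visitB_fresh by_parent f key.val keys h, hkeys₂]
          rw [this]

-- ===== VERDICT (by name: the statement is the Claim_ definition above) =====
theorem collect_subtree_py_spec : Claim_equal_collect_subtree_py := by
  intro root_key by_parent _
  unfold Spec_collect_subtree_py collect_subtree_py collect_subtree_py_alt
  have hroot : root_key ∈ candOf root_key by_parent := by simp [candOf]
  have huv : uv root_key by_parent [] ≤ (candOf root_key by_parent).length := by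
    unfold uv
    exact List.length_filter_le _ _
  have := loopA_visitList root_key by_parent _ [] rfl
    (candOf root_key by_parent).length huv [⟨root_key, hroot⟩] []
  simpa [loopA, visitList] using this
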